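-- pv_equiv track=rewrite | github.com/predye28/datos-asamblea-legislativa | extractor_proyectos/fase2_paralelo.py | dividir_rangos
-- ===== SOURCE A (Python) =====
-- def dividir_rangos(inicio: int, total: int, n: int) -> list[tuple[int, int]]:
--     """
--     Divide un rango de páginas equitativamente entre N workers.
--     Retorna lista de (inicio, fin_inclusive) para cada worker.
--     """
--     paginas_por_worker = total // n
--     sobra = total % n
--     rangos = []
--     pagina_actual = inicio
--     for i in range(n):
--         extra = 1 if i < sobra else 0
--         cant = paginas_por_worker + extra
--         fin = pagina_actual + cant - 1
--         rangos.append((pagina_actual, fin))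
--         pagina_actual = fin + 1
--     return rangos
-- ===== SOURCE B (Python) =====
-- def dividir_rangos(inicio: int, total: int, n: int) -> list[tuple[int, int]]:
--     base, sobra = divmod(total, n)
--     return [
--         (inicio + i * base + min(i, sobra),
--          inicio + (i + 1) * base + min(i + 1, sobra) - 1)
--         for i in range(n)
--     ]
-- ===== Notes on version B (the rewrite author's own statement) =====
-- stated objective: alternative
-- what changed: Replaces the accumulator loop that threads pagina_actual between iterations by a stateless list comprehension computing each worker's (start, end) directly from its index via the closed form inicio + i*base + min(i, sobra).
import Mathlib
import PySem

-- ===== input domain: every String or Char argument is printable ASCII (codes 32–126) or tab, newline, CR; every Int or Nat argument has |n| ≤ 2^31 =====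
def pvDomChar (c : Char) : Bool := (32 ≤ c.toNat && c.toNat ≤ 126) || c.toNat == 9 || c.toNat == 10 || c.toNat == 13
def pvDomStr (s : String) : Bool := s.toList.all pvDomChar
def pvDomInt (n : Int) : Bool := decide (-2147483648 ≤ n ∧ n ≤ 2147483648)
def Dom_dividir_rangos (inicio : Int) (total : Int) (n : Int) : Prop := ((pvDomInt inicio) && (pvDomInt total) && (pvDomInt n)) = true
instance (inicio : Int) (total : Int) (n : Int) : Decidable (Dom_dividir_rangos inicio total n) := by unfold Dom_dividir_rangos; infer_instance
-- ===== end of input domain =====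

-- B replaces A's carried pagina_actual accumulator by a closed-form per-index formula (objective: alternative decomposition, same cost).

-- ===== PORT A =====
-- literal transliteration of A: accumulator loop over range(n), threading (rangos, pagina_actual)
def dividir_rangos (inicio : Int) (total : Int) (n : Int) : List (Int × Int) :=
  let paginas_por_worker := PySem.Int.floordiv total n
  let sobra := PySem.Int.mod total n
  let st := (PySem.List.pyRange 0 n 1).foldl
    (fun (st : List (Int × Int) × Int) i =>
      let extra : Int := if i < sobra then 1 else 0
      let cant := paginas_por_worker + extra
      let fin := st.2 + cant - 1
      (st.1 ++ [(st.2, fin)], fin + 1))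
    ([], inicio)
  st.1

-- ===== PORT B =====
-- literal transliteration of B: divmod up front, then a comprehension with a closed form per index
def dividir_rangos_alt (inicio : Int) (total : Int) (n : Int) : List (Int × Int) :=
  let base := PySem.Int.floordiv total n
  let sobra := PySem.Int.mod total n
  (PySem.List.pyRange 0 n 1).map (fun i =>
    (inicio + i * base + min i sobra,
     inicio + (i + 1) * base + min (i + 1) sobra - 1))

-- ===== PRECONDITION & SPEC =====
-- Pre_ excludes only n = 0, where the Python A raises ZeroDivisionError.
def Pre_dividir_rangos (inicio : Int) (total : Int) (n : Int) : Prop := n ≠ 0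
instance (inicio : Int) (total : Int) (n : Int) : Decidable (Pre_dividir_rangos inicio total n) := by unfold Pre_dividir_rangos; infer_instance
def pvWitness_dividir_rangos : Int × Int × Int := (1, 10, 3)

def Spec_dividir_rangos (inicio : Int) (total : Int) (n : Int) (out : List (Int × Int)) : Prop := out = dividir_rangos_alt inicio total n
instance (inicio : Int) (total : Int) (n : Int) (out : List (Int × Int)) : Decidable (Spec_dividir_rangos inicio total n out) := by unfold Spec_dividir_rangos; infer_instance

-- ===== CLAIM (what is proved, stated in full; the proofs are below) =====
def Claim_equal_dividir_rangos : Prop := ∀ (inicio : Int) (total : Int) (n : Int), Dom_dividir_rangos inicio total n → Pre_dividir_rangos inicio total n → Spec_dividir_rangos inicio total n (dividir_rangos inicio total n)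

-- ===== LEMMAS AND PROOFS =====

-- One step of A's accumulator equals B's closed form, and re-establishes the invariant.
theorem pv_step (sobra i : Int) :
    min i sobra + (if i < sobra then (1 : Int) else 0) = min (i + 1) sobra := by
  split_ifs <;> omega

-- Loop invariant: after the indices 0..m-1, the accumulator holds B's closed-form prefix
-- and pagina_actual = inicio + m*base + min m sobra (valid for 0 ≤ sobra).
theorem pv_inv (inicio base sobra : Int) (hs : 0 ≤ sobra) (m : Nat) :
    (PySem.List.pyRange 0 (m : Int) 1).foldl
      (fun (st : List (Int × Int) × Int) i =>
        let extra : Int := if i < sobra then 1 else 0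
        let cant := base + extra
        let fin := st.2 + cant - 1
        (st.1 ++ [(st.2, fin)], fin + 1))
      ([], inicio)
    = ((PySem.List.pyRange 0 (m : Int) 1).map (fun i =>
        (inicio + i * base + min i sobra,
         inicio + (i + 1) * base + min (i + 1) sobra - 1)),
       inicio + (m : Int) * base + min (m : Int) sobra) := by
  induction m with
  | zero => simp [PySem.List.pyRange_one_eq_nil, min_eq_left hs]
  | succ k ih =>
      have hcast : ((k + 1 : Nat) : Int) = (k : Int) + 1 := by push_cast; ring
      rw [hcast, PySem.List.pyRange_one_succ_right (by positivity)]
      rw [List.foldl_append, List.map_append, ih]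
      simp only [List.foldl_cons, List.foldl_nil, List.map_cons, List.map_nil,
        Prod.mk.injEq, List.append_cancel_left_eq, List.cons.injEq, and_true]
      have hstep := pv_step sobra (k : Int)
      refine ⟨⟨trivial, ?_⟩, ?_⟩ <;> (rw [← hstep]; ring)

theorem dividir_rangos_eq_alt (inicio total n : Int) (hn : n ≠ 0) :
    dividir_rangos inicio total n = dividir_rangos_alt inicio total n := by
  rcases lt_or_gt_of_ne hn with hneg | hpos
  · unfold dividir_rangos dividir_rangos_alt
    rw [PySem.List.pyRange_one_eq_nil (le_of_lt hneg)]
    simp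
  · have hs : 0 ≤ PySem.Int.mod total n := by
      simp only [PySem.Int.mod]
      rw [Int.fmod_eq_emod]
      have := Int.emod_nonneg total (by omega : n ≠ 0)
      omega
    have hm : n = ((n.toNat : Nat) : Int) := by omega
    rw [hm]
    simp only [dividir_rangos, dividir_rangos_alt]
    rw [pv_inv inicio (PySem.Int.floordiv total ((n.toNat : Nat) : Int))
          (PySem.Int.mod total ((n.toNat : Nat) : Int)) (by rw [← hm]; exact hs) n.toNat]

-- ===== VERDICT (by name: the statement is the Claim_ definition above) =====
theorem dividir_rangos_spec : Claim_equal_dividir_rangos := by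
  intro inicio total n _ hpre
  unfold Spec_dividir_rangos
  exact dividir_rangos_eq_alt inicio total n hpre
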